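-- pv_equiv track=rewrite | github.com/stewnorriss/letsencrypt | letsencrypt-apache/letsencrypt_apache/configurator.py | get_file_path
-- ===== SOURCE A (Python) =====
-- def get_file_path(vhost_path):
--     """Get file path from augeas_vhost_path.
--
--     Takes in Augeas path and returns the file name
--
--     :param str vhost_path: Augeas virtual host path
--
--     :returns: filename of vhost
--     :rtype: str
--
--     """
--     # Strip off /files
--     avail_fp = vhost_path[6:]
--     # This can be optimized...
--     while True:
--         # Cast both to lowercase to be case insensitive
--         find_if = avail_fp.lower().find("/ifmodule")
--         if find_if != -1:
--             avail_fp = avail_fp[:find_if]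
--             continue
--         find_vh = avail_fp.lower().find("/virtualhost")
--         if find_vh != -1:
--             avail_fp = avail_fp[:find_vh]
--             continue
--         break
--     return avail_fp
-- ===== SOURCE B (Python) =====
-- def get_file_path(vhost_path):
--     """Get file path from augeas_vhost_path (single-pass min-of-first-occurrences)."""
--     avail_fp = vhost_path[6:]
--     low = avail_fp.lower()
--     idxs = [i for i in (low.find("/ifmodule"), low.find("/virtualhost")) if i != -1]
--     return avail_fp[:min(idxs)] if idxs else avail_fp
-- ===== Notes on version B (the rewrite author's own statement) =====
-- stated objective: simpler
-- what changed: Replaces A's truncate-and-rescan-until-fixed-point while-loop with a single pass: compute the first case-insensitive occurrence of each marker once and cut at the minimum of the found indices.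
import Mathlib
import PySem

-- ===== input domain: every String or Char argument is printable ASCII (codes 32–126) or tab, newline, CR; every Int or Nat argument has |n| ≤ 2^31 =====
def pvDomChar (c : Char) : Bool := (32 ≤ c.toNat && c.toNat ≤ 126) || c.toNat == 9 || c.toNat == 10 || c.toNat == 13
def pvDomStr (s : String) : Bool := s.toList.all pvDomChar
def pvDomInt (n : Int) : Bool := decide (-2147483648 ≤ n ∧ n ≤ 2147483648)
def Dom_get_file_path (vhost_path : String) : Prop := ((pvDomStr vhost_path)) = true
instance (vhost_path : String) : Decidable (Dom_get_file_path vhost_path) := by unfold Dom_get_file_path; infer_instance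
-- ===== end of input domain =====

-- B replaces A's truncate-and-rescan while-loop by one pass that cuts at the minimum of the
-- first occurrences of the two markers; objective: simpler.

-- ===== PORT A =====
-- the two marker string literals, named once so both ports and the lemmas share them
def pvIf : List Char := "/ifmodule".toList
def pvVh : List Char := "/virtualhost".toList

-- helper for the loop's termination: a found pattern index lies strictly inside the string
theorem pvFind_lt_length {s p : List Char} (hne : p ≠ [])
    (h : PySem.Chars.find (PySem.Chars.lower s) p ≠ -1) :
    (PySem.Chars.find (PySem.Chars.lower s) p).toNat < s.length := by
  have h0 : 0 ≤ PySem.Chars.find (PySem.Chars.lower s) p := by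
    have := PySem.Chars.neg_one_le_find (PySem.Chars.lower s) p; omega
  have hsp := (PySem.Chars.find_spec h0).1
  have hlen : (PySem.Chars.lower s).length = s.length := by
    simp [PySem.Chars.lower]
  have hdrop : ((PySem.Chars.lower s).drop (PySem.Chars.find (PySem.Chars.lower s) p).toNat) ≠ [] := by
    intro hnil
    rw [hnil] at hsp
    exact hne (List.prefix_nil.mp hsp)
  have hpos : 0 < ((PySem.Chars.lower s).drop (PySem.Chars.find (PySem.Chars.lower s) p).toNat).length :=
    List.length_pos_iff.mpr hdrop
  rw [List.length_drop] at hpos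
  omega

-- the `while True:` loop of A, recursing on the strictly shrinking string
def pvLoopA (avail_fp : List Char) : List Char :=
  let find_if := PySem.Chars.find (PySem.Chars.lower avail_fp) pvIf
  if _h1 : find_if ≠ -1 then
    pvLoopA (PySem.List.slice avail_fp none (some find_if))
  else
    let find_vh := PySem.Chars.find (PySem.Chars.lower avail_fp) pvVh
    if _h2 : find_vh ≠ -1 then
      pvLoopA (PySem.List.slice avail_fp none (some find_vh))
    else avail_fp
termination_by avail_fp.length
decreasing_by
  · have h0 : (0:Int) ≤ find_if := by
      have := PySem.Chars.neg_one_le_find (PySem.Chars.lower avail_fp) pvIf; omega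
    rw [PySem.List.slice_to _ h0]
    have := pvFind_lt_length (s := avail_fp) (p := pvIf) (by decide) _h1
    simp only [List.length_take]
    omega
  · have h0 : (0:Int) ≤ find_vh := by
      have := PySem.Chars.neg_one_le_find (PySem.Chars.lower avail_fp) pvVh; omega
    rw [PySem.List.slice_to _ h0]
    have := pvFind_lt_length (s := avail_fp) (p := pvVh) (by decide) _h2
    simp only [List.length_take]
    omega

def get_file_path (vhost_path : String) : String :=
  String.ofList (pvLoopA (PySem.List.slice vhost_path.toList (some 6) none))

-- ===== PORT B =====
def get_file_path_alt (vhost_path : String) : String :=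
  let avail_fp := PySem.List.slice vhost_path.toList (some 6) none
  let low := PySem.Chars.lower avail_fp
  let idxs := ([PySem.Chars.find low pvIf, PySem.Chars.find low pvVh]).filter (fun i => i != -1)
  match PySem.List.min? idxs (fun i => i) with
  | some m => String.ofList (PySem.List.slice avail_fp none (some m))
  | none => String.ofList avail_fp

-- ===== PRECONDITION & SPEC =====
def Spec_get_file_path (vhost_path : String) (out : String) : Prop := out = get_file_path_alt vhost_path
instance (vhost_path : String) (out : String) : Decidable (Spec_get_file_path vhost_path out) := by unfold Spec_get_file_path; infer_instance

-- ===== CLAIM (what is proved, stated in full; the proofs are below) =====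
def Claim_equal_get_file_path : Prop := ∀ (vhost_path : String), Dom_get_file_path vhost_path → Spec_get_file_path vhost_path (get_file_path vhost_path)

-- ===== LEMMAS AND PROOFS =====

theorem pvLower_take (s : List Char) (k : Nat) :
    PySem.Chars.lower (s.take k) = (PySem.Chars.lower s).take k := by
  simp [PySem.Chars.lower, List.map_take]

theorem pvPrefix_getElem? {α : Type} {l₁ l₂ : List α} (h : l₁ <+: l₂) {i : Nat}
    (hi : i < l₁.length) : l₂[i]? = l₁[i]? := by
  obtain ⟨t, rfl⟩ := h
  exact List.getElem?_append_left hi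

-- first-occurrence reading of find
theorem pvFind_first_occ {s p : List Char} {v : Int}
    (hv : PySem.Chars.find (PySem.Chars.lower s) p = v) (h0 : 0 ≤ v) :
    p <+: (PySem.Chars.lower s).drop v.toNat ∧
      ∀ i < v.toNat, ¬ p <+: (PySem.Chars.lower s).drop i := by
  have := PySem.Chars.find_spec (s := PySem.Chars.lower s) (sub := p) (by omega)
  rwa [hv] at this

-- no occurrence of p survives in `take k` when every occurrence ends past k
theorem pvFind_take_neg {s p : List Char} {k : Nat} (hp : p ≠ [])
    (h : ∀ i : Nat, p <+: (PySem.Chars.lower s).drop i → k < i + p.length) :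
    PySem.Chars.find (PySem.Chars.lower (s.take k)) p = -1 := by
  rw [pvLower_take, PySem.Chars.find_eq_neg_one_iff]
  intro hinf
  obtain ⟨j, hj⟩ := (PySem.Chars.exists_prefix_drop_iff_isIn p _).mpr
    ((PySem.Chars.isIn_iff_infix _ _).mpr hinf)
  rw [List.drop_take] at hj
  obtain ⟨hpre, hlen⟩ := List.prefix_take_iff.mp hj
  have hplen : 0 < p.length := List.length_pos_iff.mpr hp
  have := h j hpre
  omega

-- find = -1 propagates to any take
theorem pvFind_take_of_neg {s p : List Char} {k : Nat} (hp : p ≠ [])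
    (h : PySem.Chars.find (PySem.Chars.lower s) p = -1) :
    PySem.Chars.find (PySem.Chars.lower (s.take k)) p = -1 := by
  apply pvFind_take_neg hp
  intro i hi
  exfalso
  rw [PySem.Chars.find_eq_neg_one_iff] at h
  exact h (List.IsInfix.trans (List.prefix_iff_eq_take.mp hi ▸ List.take_prefix _ _).isInfix
    (List.drop_suffix _ _).isInfix)

-- cutting at or before (first occurrence + pattern length - 1) leaves no occurrence
theorem pvFind_cut {s p : List Char} {v : Int} {k : Nat} (hp : p ≠ [])
    (hv : PySem.Chars.find (PySem.Chars.lower s) p = v) (h0 : 0 ≤ v)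
    (hk : k < v.toNat + p.length) :
    PySem.Chars.find (PySem.Chars.lower (s.take k)) p = -1 := by
  apply pvFind_take_neg hp
  intro i hi
  have hspec := pvFind_first_occ hv h0
  have : v.toNat ≤ i := by
    by_contra hlt
    exact hspec.2 i (by omega) hi
  omega

-- the first occurrence at v is preserved by `take k` when it fits: v + |p| ≤ k
theorem pvFind_take_pos {s p : List Char} {k : Nat} {v : Int}
    (hv : PySem.Chars.find (PySem.Chars.lower s) p = v) (h0 : 0 ≤ v)
    (hk : v.toNat + p.length ≤ k) :
    PySem.Chars.find (PySem.Chars.lower (s.take k)) p = v := by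
  rw [pvLower_take]
  have hspec := pvFind_first_occ hv h0
  have hocc : p <+: ((PySem.Chars.lower s).take k).drop v.toNat := by
    rw [List.drop_take, List.prefix_take_iff]
    exact ⟨hspec.1, by omega⟩
  have hfind0 : 0 ≤ PySem.Chars.find ((PySem.Chars.lower s).take k) p := by
    rw [PySem.Chars.find_nonneg_iff]
    exact List.IsInfix.trans (List.prefix_iff_eq_take.mp hocc ▸ List.take_prefix _ _).isInfix
      (List.drop_suffix _ _).isInfix
  have hwspec := PySem.Chars.find_spec (s := (PySem.Chars.lower s).take k) (sub := p) hfind0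
  set w := PySem.Chars.find ((PySem.Chars.lower s).take k) p with hw
  have hwle : w.toNat ≤ v.toNat := by
    by_contra hlt
    exact hwspec.2 v.toNat (by omega) hocc
  have hocc2 : p <+: (PySem.Chars.lower s).drop w.toNat := by
    have h' := hwspec.1
    rw [List.drop_take, List.prefix_take_iff] at h'
    exact h'.1
  have hvle : v.toNat ≤ w.toNat := by
    by_contra hlt
    exact hspec.2 w.toNat (by omega) hocc2
  omega

-- unfolding equation for the loop (ite reading of the dite definition)
theorem pvLoopA_eq (s : List Char) :
    pvLoopA s =
      (if PySem.Chars.find (PySem.Chars.lower s) pvIf ≠ -1 then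
        pvLoopA (PySem.List.slice s none (some (PySem.Chars.find (PySem.Chars.lower s) pvIf)))
       else if PySem.Chars.find (PySem.Chars.lower s) pvVh ≠ -1 then
        pvLoopA (PySem.List.slice s none (some (PySem.Chars.find (PySem.Chars.lower s) pvVh)))
       else s) := by
  rw [pvLoopA]
  split_ifs <;> simp_all

-- both finds are -1 → the loop stops immediately
theorem pvLoopA_stop {s : List Char}
    (h1 : PySem.Chars.find (PySem.Chars.lower s) pvIf = -1)
    (h2 : PySem.Chars.find (PySem.Chars.lower s) pvVh = -1) :
    pvLoopA s = s := by
  rw [pvLoopA_eq, if_neg (by simp [h1]), if_neg (by simp [h2])]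

-- "/virtualhost" contains '/' only at index 0, and "/ifmodule" starts with '/';
-- hence if "/virtualhost" occurs at v and "/ifmodule" occurs at f with v < f, then v + 12 ≤ f
theorem pvSep {l : List Char} {v f : Nat}
    (hv : pvVh <+: l.drop v) (hf : pvIf <+: l.drop f) (hvf : v < f) : v + 12 ≤ f := by
  by_contra hcon
  have hslash : l[f]? = some '/' := by
    have h0 := pvPrefix_getElem? hf (i := 0) (by decide)
    rw [List.getElem?_drop] at h0
    simpa [pvIf] using h0
  obtain ⟨d, hd1, hd2, hdfv⟩ : ∃ d : Nat, 1 ≤ d ∧ d < 12 ∧ f = v + d :=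
    ⟨f - v, by omega, by omega, by omega⟩
  have hat : l[v + d]? = pvVh[d]? := by
    have h0 := pvPrefix_getElem? hv (i := d) (by simp [pvVh]; omega)
    rw [List.getElem?_drop] at h0
    exact h0
  rw [← hdfv, hslash] at hat
  interval_cases d <;> simp [pvVh] at hat

-- core list-level equivalence: the loop computes the min-of-first-occurrences cut
theorem pvLoop_eq_cut (s : List Char) :
    pvLoopA s =
      (match PySem.List.min?
          (([PySem.Chars.find (PySem.Chars.lower s) pvIf,
             PySem.Chars.find (PySem.Chars.lower s) pvVh]).filter (fun i => i != -1))
          (fun i => i) with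
       | some m => PySem.List.slice s none (some m)
       | none => s) := by
  have lIf : pvIf.length = 9 := rfl
  have lVh : pvVh.length = 12 := rfl
  have hIfne : pvIf ≠ [] := by decide
  have hVhne : pvVh ≠ [] := by decide
  have hfi1 := PySem.Chars.neg_one_le_find (PySem.Chars.lower s) pvIf
  have hfv1 := PySem.Chars.neg_one_le_find (PySem.Chars.lower s) pvVh
  by_cases h1 : PySem.Chars.find (PySem.Chars.lower s) pvIf = -1
    <;> by_cases h2 : PySem.Chars.find (PySem.Chars.lower s) pvVh = -1
  · -- neither marker occurs
    rw [pvLoopA_stop h1 h2]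
    simp [h1, h2, PySem.List.min?]
  · -- only "/virtualhost" occurs
    have h02 : (0:Int) ≤ PySem.Chars.find (PySem.Chars.lower s) pvVh := by omega
    rw [pvLoopA_eq, if_neg (by simp [h1]), if_pos h2, PySem.List.slice_to _ h02]
    have e1 := pvFind_take_of_neg (k := (PySem.Chars.find (PySem.Chars.lower s) pvVh).toNat) hIfne h1
    have e2 := pvFind_cut (k := (PySem.Chars.find (PySem.Chars.lower s) pvVh).toNat) hVhne rfl h02 (by omega)
    rw [pvLoopA_stop e1 e2]
    simp [h1, h2, PySem.List.min?_id_cons, PySem.List.slice_to _ h02]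
  · -- only "/ifmodule" occurs
    have h01 : (0:Int) ≤ PySem.Chars.find (PySem.Chars.lower s) pvIf := by omega
    rw [pvLoopA_eq, if_pos h1, PySem.List.slice_to _ h01]
    have e1 := pvFind_cut (k := (PySem.Chars.find (PySem.Chars.lower s) pvIf).toNat) hIfne rfl h01 (by omega)
    have e2 := pvFind_take_of_neg (k := (PySem.Chars.find (PySem.Chars.lower s) pvIf).toNat) hVhne h2
    rw [pvLoopA_stop e1 e2]
    simp [h1, h2, PySem.List.min?_id_cons, PySem.List.slice_to _ h01]
  · -- both occur
    have h01 : (0:Int) ≤ PySem.Chars.find (PySem.Chars.lower s) pvIf := by omega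
    have h02 : (0:Int) ≤ PySem.Chars.find (PySem.Chars.lower s) pvVh := by omega
    rw [pvLoopA_eq, if_pos h1, PySem.List.slice_to _ h01]
    by_cases hle : PySem.Chars.find (PySem.Chars.lower s) pvIf ≤ PySem.Chars.find (PySem.Chars.lower s) pvVh
    · -- cut at the "/ifmodule" index kills both markers
      have e1 := pvFind_cut (k := (PySem.Chars.find (PySem.Chars.lower s) pvIf).toNat) hIfne rfl h01 (by omega)
      have e2 := pvFind_cut (k := (PySem.Chars.find (PySem.Chars.lower s) pvIf).toNat) hVhne rfl h02 (by omega)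
      rw [pvLoopA_stop e1 e2]
      have hmin : min (PySem.Chars.find (PySem.Chars.lower s) pvIf)
          (PySem.Chars.find (PySem.Chars.lower s) pvVh) = PySem.Chars.find (PySem.Chars.lower s) pvIf :=
        min_eq_left hle
      simp [h1, h2, PySem.List.min?_id_cons, hmin, PySem.List.slice_to _ h01]
    · -- fv < fi : the occurrences cannot overlap, so the loop cuts at fi, then at fv
      have hvf : (PySem.Chars.find (PySem.Chars.lower s) pvVh).toNat
          < (PySem.Chars.find (PySem.Chars.lower s) pvIf).toNat := by omega
      have hsep : (PySem.Chars.find (PySem.Chars.lower s) pvVh).toNat + 12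
          ≤ (PySem.Chars.find (PySem.Chars.lower s) pvIf).toNat :=
        pvSep (pvFind_first_occ rfl h02).1 (pvFind_first_occ rfl h01).1 hvf
      have e1 := pvFind_cut (k := (PySem.Chars.find (PySem.Chars.lower s) pvIf).toNat) hIfne rfl h01 (by omega)
      have e2 : PySem.Chars.find (PySem.Chars.lower
            (s.take (PySem.Chars.find (PySem.Chars.lower s) pvIf).toNat)) pvVh
          = PySem.Chars.find (PySem.Chars.lower s) pvVh :=
        pvFind_take_pos rfl h02 (by omega)
      rw [pvLoopA_eq, if_neg (by simp [e1]), e2, if_pos h2, PySem.List.slice_to _ h02,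
        List.take_take, min_eq_left (by omega)]
      have e3 := pvFind_cut (k := (PySem.Chars.find (PySem.Chars.lower s) pvVh).toNat) hIfne rfl h01 (by omega)
      have e4 := pvFind_cut (k := (PySem.Chars.find (PySem.Chars.lower s) pvVh).toNat) hVhne rfl h02 (by omega)
      rw [pvLoopA_stop e3 e4]
      have hmin : min (PySem.Chars.find (PySem.Chars.lower s) pvIf)
          (PySem.Chars.find (PySem.Chars.lower s) pvVh) = PySem.Chars.find (PySem.Chars.lower s) pvVh :=
        min_eq_right (by omega)
      simp [h1, h2, PySem.List.min?_id_cons, hmin, PySem.List.slice_to _ h02]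

-- ===== VERDICT (by name: the statement is the Claim_ definition above) =====
theorem get_file_path_spec : Claim_equal_get_file_path := by
  intro vhost_path _
  unfold Spec_get_file_path get_file_path get_file_path_alt
  rw [pvLoop_eq_cut]
  cases h : PySem.List.min?
      (([PySem.Chars.find (PySem.Chars.lower (PySem.List.slice vhost_path.toList (some 6) none)) pvIf,
         PySem.Chars.find (PySem.Chars.lower (PySem.List.slice vhost_path.toList (some 6) none)) pvVh]).filter
        (fun i => i != -1)) (fun i => i) <;> simp [h]
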